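-- pv_equiv track=rewrite | github.com/0hhanum/algorithm_study | programmers/hash/disguise.py | solution
-- ===== SOURCE A (Python) =====
-- from itertools import combinations
--
-- def solution(clothes):
--     table = {}
--     for name, kind in clothes:
--         try:
--             table[kind].append(name)
--         except KeyError:
--             table[kind] = [name]
--
--     for kind in table:
--         table[kind] = len(table[kind])
--     simplified_list = list(table.values())
--     answer = 0
--     for i in range(1, len(simplified_list) + 1):
--         for selected in list(combinations(simplified_list, i)):
--             answer += multiply(selected)
--
--     return answer
--
-- def multiply(li):
--     result = 1
--     for i in li:
--         result *= i
--     return result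
-- ===== SOURCE B (Python) =====
-- def solution(clothes):
--     counts = {}
--     for _, kind in clothes:
--         counts[kind] = counts.get(kind, 0) + 1
--     answer = 1
--     for c in counts.values():
--         answer *= c + 1
--     return answer - 1
-- ===== Notes on version B (the rewrite author's own statement) =====
-- stated objective: faster
-- what changed: B counts each kind directly and returns the closed form prod(count+1)-1 instead of enumerating every nonempty subset of kinds with itertools.combinations and summing subset products.
import Mathlib
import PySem

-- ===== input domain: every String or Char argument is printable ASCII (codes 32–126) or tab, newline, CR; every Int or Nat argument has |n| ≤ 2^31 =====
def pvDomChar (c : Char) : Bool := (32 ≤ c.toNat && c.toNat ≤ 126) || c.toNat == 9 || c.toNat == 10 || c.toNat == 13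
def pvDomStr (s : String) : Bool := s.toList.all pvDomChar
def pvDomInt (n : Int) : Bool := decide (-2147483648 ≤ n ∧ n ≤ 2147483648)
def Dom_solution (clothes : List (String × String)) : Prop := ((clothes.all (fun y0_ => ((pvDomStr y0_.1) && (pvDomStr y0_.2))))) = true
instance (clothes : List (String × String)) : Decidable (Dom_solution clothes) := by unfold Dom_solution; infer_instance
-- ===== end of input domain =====

-- B replaces A's exponential enumeration of all nonempty kind-subsets (itertools.combinations)
-- by the closed form: product of (count+1) over kinds, minus 1 — an asymptotic speed-up.


-- ===== PORT A =====
-- helper 'multiply' of A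
def multiply (li : List Int) : Int := li.foldl (fun result i => result * i) 1

-- itertools.combinations(l, i): all length-i subsequences of l, in itertools' order
-- (combinations containing the head first, then those without it)
def combos {α : Type} : Nat → List α → List (List α)
  | 0, _ => [[]]
  | _ + 1, [] => []
  | i + 1, x :: xs => (combos i xs).map (fun s => x :: s) ++ combos (i + 1) xs

def solution (clothes : List (String × String)) : Int :=
  -- first loop: group the names per kind (try append / except KeyError -> new singleton list)
  let table : PySem.Dict String (List String) :=
    clothes.foldl (fun d p =>
      match d.get? p.2 with
      | some l => d.insert p.2 (l ++ [p.1])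
      | none => d.insert p.2 [p.1]) PySem.Dict.empty
  -- second loop 'for kind in table: table[kind] = len(table[kind])': Python retypes the dict's
  -- values in place from list to int; Lean dicts are homogeneous, so the same loop over the keys
  -- builds the int-valued dict (each key is distinct and read exactly once, before its write)
  let table2 : PySem.Dict String Int :=
    table.keys.foldl (fun d k => d.insert k ((table.getD k []).length : Int)) PySem.Dict.empty
  let simplified : List Int := table2.values
  -- for i in range(1, len+1): for selected in combinations(simplified, i): answer += multiply(selected)
  (PySem.List.pyRange 1 ((simplified.length : Int) + 1) 1).foldl
    (fun answer i => (combos i.toNat simplified).foldl (fun a selected => a + multiply selected) answer) 0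

-- ===== PORT B =====
def solution_alt (clothes : List (String × String)) : Int :=
  let counts : PySem.Dict String Int :=
    clothes.foldl (fun d p => d.insert p.2 (d.getD p.2 0 + 1)) PySem.Dict.empty
  counts.values.foldl (fun answer c => answer * (c + 1)) 1 - 1

-- ===== PRECONDITION & SPEC =====
def Spec_solution (clothes : List (String × String)) (out : Int) : Prop := out = solution_alt clothes
instance (clothes : List (String × String)) (out : Int) : Decidable (Spec_solution clothes out) := by unfold Spec_solution; infer_instance

-- ===== CLAIM (what is proved, stated in full; the proofs are below) =====
def Claim_equal_solution : Prop := ∀ (clothes : List (String × String)), Dom_solution clothes → Spec_solution clothes (solution clothes)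

-- ===== LEMMAS AND PROOFS =====

theorem combos_big {α : Type} (i : Nat) (l : List α) (h : l.length < i) : combos i l = [] := by
  induction l generalizing i with
  | nil => cases i with | zero => omega | succ j => rfl
  | cons x xs ih =>
    cases i with
    | zero => omega
    | succ j =>
      simp at h
      simp [combos, ih j (by omega), ih (j + 1) (by omega)]

-- sum of products over the size-k combinations
def combSum (l : List Int) (k : Nat) : Int := ((combos k l).map List.prod).sum

theorem combSum_zero (l : List Int) : combSum l 0 = 1 := by simp [combSum, combos]

theorem combSum_succ (x : Int) (xs : List Int) (k : Nat) :
    combSum (x :: xs) (k + 1) = x * combSum xs k + combSum xs (k + 1) := by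
  simp [combSum, combos, List.map_map, Function.comp_def, List.sum_map_mul_left]

-- the subset-sum / product identity, over all sizes 0..length
theorem combSum_total (l : List Int) :
    ∑ k ∈ Finset.range (l.length + 1), combSum l k = (l.map (fun c => c + 1)).prod := by
  induction l with
  | nil => simp [combSum_zero]
  | cons x xs ih =>
    have hbig : combSum xs (xs.length + 1) = 0 := by
      simp [combSum, combos_big (xs.length + 1) xs (by omega)]
    have h1 : ∑ k ∈ Finset.range (xs.length + 1 + 1), combSum (x :: xs) k
        = ∑ k ∈ Finset.range (xs.length + 1), combSum (x :: xs) (k + 1) + combSum (x :: xs) 0 :=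
      Finset.sum_range_succ' _ _
    have h2 : ∑ k ∈ Finset.range (xs.length + 1), combSum (x :: xs) (k + 1)
        = x * ∑ k ∈ Finset.range (xs.length + 1), combSum xs k
          + ∑ k ∈ Finset.range (xs.length + 1), combSum xs (k + 1) := by
      rw [Finset.sum_congr rfl (fun k _ => combSum_succ x xs k), Finset.sum_add_distrib,
        ← Finset.mul_sum]
    have h3 : ∑ k ∈ Finset.range (xs.length + 1), combSum xs (k + 1)
        = (∑ k ∈ Finset.range (xs.length + 1 + 1), combSum xs k) - combSum xs 0 := by
      rw [Finset.sum_range_succ' (combSum xs) (xs.length + 1)]; ring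
    have h4 : ∑ k ∈ Finset.range (xs.length + 1 + 1), combSum xs k
        = ∑ k ∈ Finset.range (xs.length + 1), combSum xs k := by
      rw [Finset.sum_range_succ, hbig, add_zero]
    simp only [List.length_cons, h1, h2, h3, h4, combSum_zero, ih, List.map_cons, List.prod_cons]
    ring

theorem get?_mk_map (items : List (String × List String)) (k : String) :
    (PySem.Dict.mk (items.map (fun q => (q.1, (q.2.length : Int))))).get? k
      = ((PySem.Dict.mk items).get? k).map (fun l => (l.length : Int)) := by
  induction items with
  | nil => rfl
  | cons p rest ih =>
    obtain ⟨a, b⟩ := p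
    simp only [List.map_cons, PySem.Dict.get?_mk_cons]
    by_cases h : a = k
    · simp [h]
    · simp [h, ih]

theorem get?_rel (t : PySem.Dict String (List String)) (c : PySem.Dict String Int)
    (h : c.items = t.items.map (fun q => (q.1, (q.2.length : Int)))) (k : String) :
    c.get? k = (t.get? k).map (fun l => (l.length : Int)) := by
  have hc : c = PySem.Dict.mk (t.items.map (fun q => (q.1, (q.2.length : Int)))) :=
    PySem.Dict.ext h
  rw [hc, get?_mk_map]

-- the invariant tying A's dict of name-lists to B's counter dict
theorem dicts_rel (clothes : List (String × String))
    (t : PySem.Dict String (List String)) (c : PySem.Dict String Int)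
    (h : c.items = t.items.map (fun q => (q.1, (q.2.length : Int)))) :
    (clothes.foldl (fun d p => d.insert p.2 (d.getD p.2 0 + 1)) c).items
      = (clothes.foldl (fun d p =>
          match d.get? p.2 with
          | some l => d.insert p.2 (l ++ [p.1])
          | none => d.insert p.2 [p.1]) t).items.map (fun q => (q.1, (q.2.length : Int))) := by
  induction clothes generalizing t c with
  | nil => exact h
  | cons p rest ih =>
    simp only [List.foldl_cons]
    apply ih
    have hget := get?_rel t c h p.2
    have hcont : c.contains p.2 = t.contains p.2 := by
      rw [PySem.Dict.contains_eq_isSome_get?, PySem.Dict.contains_eq_isSome_get?, hget]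
      cases t.get? p.2 <;> rfl
    cases hg : t.get? p.2 with
    | some l =>
      have hct : t.contains p.2 = true := by
        rw [PySem.Dict.contains_eq_isSome_get?, hg]; rfl
      have hgD : c.getD p.2 0 = (l.length : Int) := by
        rw [PySem.Dict.getD_eq_get?_getD, hget, hg]; rfl
      simp only [PySem.Dict.items_insert_of_contains t _ hct,
        PySem.Dict.items_insert_of_contains c _ (hcont.trans hct), h, hgD,
        List.map_map]
      apply List.map_congr_left
      intro q _
      by_cases hq : q.1 = p.2 <;> simp [hq]
    | none =>
      have hct : t.contains p.2 = false := by
        rw [PySem.Dict.contains_eq_isSome_get?, hg]; rfl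
      have hgD : c.getD p.2 0 = 0 := by
        rw [PySem.Dict.getD_eq_get?_getD, hget, hg]; rfl
      simp only [PySem.Dict.items_insert_of_not_contains t _ hct,
        PySem.Dict.items_insert_of_not_contains c _ (hcont.trans hct), h, hgD,
        List.map_append]
      rfl

theorem sum_map_range (n : Nat) (f : Nat → Int) :
    ((List.range n).map f).sum = ∑ k ∈ Finset.range n, f k := by
  induction n with
  | zero => simp
  | succ m ih => simp [List.range_succ, Finset.sum_range_succ, ih]

-- A's double loop over combination sizes equals B's product loop, minus 1, on ANY value list
theorem loops_eq (l : List Int) :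
    (PySem.List.pyRange 1 ((l.length : Int) + 1) 1).foldl
        (fun answer i => (combos i.toNat l).foldl (fun a selected => a + multiply selected) answer) 0
      = l.foldl (fun answer c => answer * (c + 1)) 1 - 1 := by
  have hmul : multiply = List.prod := by
    funext li; rw [multiply, List.prod_eq_foldl]
  have hrhs : l.foldl (fun answer c => answer * (c + 1)) 1 = (l.map (fun c => c + 1)).prod := by
    rw [List.prod_eq_foldl, List.foldl_map]
  rw [hrhs, ← combSum_total l, Finset.sum_range_succ' (combSum l) l.length, combSum_zero]
  simp only [PySem.List.foldl_add, PySem.List.pyRange_one, hmul]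
  have hn : (((l.length : Int) + 1) - 1).toNat = l.length := by omega
  rw [hn, List.map_map, sum_map_range]
  have hk : ∀ k : Nat, ((fun x : Int => ((combos x.toNat l).map List.prod).sum) ∘
      (fun k : Nat => (1 : Int) + (k : Int))) k = combSum l (k + 1) := by
    intro k
    have h1 : ((1 : Int) + (k : Int)).toNat = k + 1 := by omega
    simp only [Function.comp_apply, h1]; rfl
  rw [Finset.sum_congr rfl (fun k _ => hk k)]
  ring

-- ===== VERDICT (by name: the statement is the Claim_ definition above) =====
theorem solution_spec : Claim_equal_solution := by
  intro clothes _
  unfold Spec_solution solution solution_alt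
  simp only []
  -- name the three dicts
  set t : PySem.Dict String (List String) :=
    clothes.foldl (fun d p =>
      match d.get? p.2 with
      | some l => d.insert p.2 (l ++ [p.1])
      | none => d.insert p.2 [p.1]) PySem.Dict.empty with ht
  set c : PySem.Dict String Int :=
    clothes.foldl (fun d p => d.insert p.2 (d.getD p.2 0 + 1)) PySem.Dict.empty with hc
  have hitems : c.items = t.items.map (fun q => (q.1, (q.2.length : Int))) :=
    dicts_rel clothes PySem.Dict.empty PySem.Dict.empty rfl
  -- t's keys are distinct
  have hfn : (fun (d : PySem.Dict String (List String)) (p : String × String) =>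
      match d.get? p.2 with
      | some l => d.insert p.2 (l ++ [p.1])
      | none => d.insert p.2 [p.1])
      = (fun d p => d.insert p.2
          (match d.get? p.2 with | some l => l ++ [p.1] | none => [p.1])) := by
    funext d p; cases d.get? p.2 <;> rfl
  have hnd : t.keys.Nodup := by
    rw [ht, hfn]
    exact PySem.Dict.nodup_keys_foldl_insert_key clothes Prod.snd _ PySem.Dict.empty
      (by simp [PySem.Dict.keys_empty])
  -- the rebuilt int dict: items are keys paired with lengths
  have h2 : (t.keys.foldl (fun d k => d.insert k ((t.getD k []).length : Int))
        PySem.Dict.empty).items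
      = t.keys.map (fun k => (k, ((t.getD k []).length : Int))) := by
    have := PySem.Dict.items_foldl_insert_fresh t.keys (fun a => a)
      (fun a => ((t.getD a []).length : Int)) PySem.Dict.empty
      (fun a _ => PySem.Dict.contains_empty a) (by simpa using hnd)
    simpa using this
  -- hence A's simplified list IS B's counts.values
  have hvals : (PySem.Dict.mk (t.keys.foldl
        (fun d k => d.insert k ((t.getD k []).length : Int)) PySem.Dict.empty).items).values
      = c.values := by
    rw [h2]
    show (t.keys.map (fun k => (k, ((t.getD k []).length : Int)))).map Prod.snd
      = c.items.map Prod.snd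
    rw [hitems, PySem.Dict.items_eq_map_keys t hnd []]
    simp [List.map_map, Function.comp_def]
  have hvals' : (t.keys.foldl (fun d k => d.insert k ((t.getD k []).length : Int))
      PySem.Dict.empty).values = c.values := hvals
  rw [hvals', loops_eq c.values]
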